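-- pv_equiv track=rewrite | github.com/hjdjoo/anatomylens | scripts/python/export_anatomy.py | normalize_mesh_id
-- ===== SOURCE A (Python) =====
-- def normalize_mesh_id(name: str, is_bilateral: bool = False) -> str:
--     """
--     Convert Z-Anatomy name to normalized mesh ID.
--     For bilateral structures, strips the side suffix to use base name.
--     """
--     clean = name.lower()
--
--     # For bilateral structures, remove side suffix entirely
--     # For non-bilateral (orphan or midline), preserve it
--     if is_bilateral:
--         for suffix in [".l", ".r"]:
--             if clean.endswith(suffix):
--                 clean = clean[:-len(suffix)]
--                 break
--     else:
--         # Preserve side suffix for non-bilateral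
--         side_suffix = None
--         for suffix, normalized in [(".l", "_l"), (".r", "_r")]:
--             if clean.endswith(suffix):
--                 clean = clean[:-len(suffix)]
--                 side_suffix = normalized
--                 break
--
--         if side_suffix:
--             # Normalize then add suffix back
--             clean = clean.replace(" ", "_").replace("-", "_").replace(".", "_")
--             clean = clean.replace("(", "").replace(")", "")
--             while "__" in clean:
--                 clean = clean.replace("__", "_")
--             clean = clean.strip("_")
--             return clean + side_suffix
--
--     # Normalize characters
--     clean = clean.replace(" ", "_").replace("-", "_").replace(".", "_")
--     clean = clean.replace("(", "").replace(")", "")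
--     while "__" in clean:
--         clean = clean.replace("__", "_")
--     clean = clean.strip("_")
--
--     return clean
-- ===== SOURCE B (Python) =====
-- def normalize_mesh_id(name: str, is_bilateral: bool = False) -> str:
--     """Single-pass rewrite: detect the side suffix once, then build the
--     normalized id in one left-to-right scan that maps separators to '_',
--     drops parentheses and collapses/strips underscores on the fly."""
--     clean = name.lower()
--     side = ""
--     if clean.endswith(".l"):
--         clean = clean[:-2]
--         if not is_bilateral:
--             side = "_l"
--     elif clean.endswith(".r"):
--         clean = clean[:-2]
--         if not is_bilateral:
--             side = "_r"
--     out = []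
--     for ch in clean:
--         if ch in "()":
--             continue
--         if ch in " -.":
--             ch = "_"
--         if ch == "_":
--             if out and out[-1] != "_":
--                 out.append("_")
--         else:
--             out.append(ch)
--     if out and out[-1] == "_":
--         out.pop()
--     return "".join(out) + side
-- ===== Notes on version B (the rewrite author's own statement) =====
-- stated objective: alternative
-- what changed: B replaces A's five whole-string replace() passes, the repeated double-underscore collapse loop and the final strip with a single left-to-right scan that maps separators, drops parentheses and collapses/strips separators on the fly, detecting the side suffix once with an if/elif instead of A's three duplicated normalization blocks.
import Mathlib
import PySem

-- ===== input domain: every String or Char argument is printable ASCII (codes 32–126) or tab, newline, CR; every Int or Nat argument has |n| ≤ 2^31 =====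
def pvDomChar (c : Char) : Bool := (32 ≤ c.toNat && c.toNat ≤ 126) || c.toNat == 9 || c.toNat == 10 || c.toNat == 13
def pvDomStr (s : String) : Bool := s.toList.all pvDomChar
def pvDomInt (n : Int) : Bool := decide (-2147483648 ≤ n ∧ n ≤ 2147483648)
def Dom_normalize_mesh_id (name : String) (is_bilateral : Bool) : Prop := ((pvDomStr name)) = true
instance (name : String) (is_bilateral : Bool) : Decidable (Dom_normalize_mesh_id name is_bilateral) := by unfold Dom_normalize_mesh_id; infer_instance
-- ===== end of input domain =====

-- B replaces A's five global replace() passes, the repeated double-underscore collapse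
-- while-loop and the final strip by one left-to-right scan that maps/drops characters
-- and collapses/strips separators on the fly (objective: alternative single-pass algorithm).

-- Lemmas needed by port A's termination (the while '__' in clean loop):
-- structural form of one collapse pass of A
def pvRep2 : List Char → List Char
  | [] => []
  | [c] => [c]
  | a :: b :: r => if a = '_' ∧ b = '_' then '_' :: pvRep2 r else a :: pvRep2 (b :: r)

-- structural form of A's loop condition
def pvHasDD : List Char → Bool
  | a :: b :: r => (a = '_' && b = '_') || pvHasDD (b :: r)
  | _ => false

theorem pvGo2_eq (fuel : Nat) (l acc : List Char) (h : l.length ≤ fuel) :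
    PySem.Chars.replace.go ['_','_'] ['_'] fuel l acc = acc.reverse ++ pvRep2 l := by
  induction fuel generalizing l acc with
  | zero =>
    cases l with
    | nil => simp [PySem.Chars.replace.go, pvRep2]
    | cons a t => simp at h
  | succ n ih =>
    cases l with
    | nil => simp [PySem.Chars.replace.go, pvRep2]
    | cons a t =>
      cases t with
      | nil =>
        rw [PySem.Chars.replace.go]
        have hp : ¬ (List.isPrefixOf ['_','_'] [a] = true) := by
          simp [List.isPrefixOf]
        simp only [hp, ite_false]
        rw [ih [] (a :: acc) (by simp)]
        simp [pvRep2]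
      | cons b r =>
        rw [PySem.Chars.replace.go]
        by_cases hab : a = '_' ∧ b = '_'
        · have hp : List.isPrefixOf ['_','_'] (a :: b :: r) = true := by
            simp [List.isPrefixOf, hab.1, hab.2]
          simp only [hp, if_pos]
          rw [show (['_','_'] : List Char).length = 2 from rfl]
          rw [show List.drop 2 (a :: b :: r) = r from rfl]
          rw [ih r _ (by simp at h ⊢; omega)]
          simp [pvRep2, hab]
        · have hp : ¬ (List.isPrefixOf ['_','_'] (a :: b :: r) = true) := by
            simp [List.isPrefixOf]; tauto
          simp only [hp, ite_false]
          rw [ih (b :: r) (a :: acc) (by simp at h ⊢; omega)]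
          simp [pvRep2, hab]

theorem pvReplace2_eq (s : List Char) :
    PySem.Chars.replace s ['_','_'] ['_'] = pvRep2 s := by
  rw [PySem.Chars.replace]
  simp [pvGo2_eq s.length s [] le_rfl]

theorem pvInfix_iff_hasDD (s : List Char) : (['_','_'] <:+: s) ↔ pvHasDD s = true := by
  induction s with
  | nil => simp [pvHasDD]
  | cons a t ih =>
    cases t with
    | nil =>
      constructor
      · intro hi; have := hi.length_le; simp at this
      · intro hc; simp [pvHasDD] at hc
    | cons b r =>
      rw [List.infix_cons_iff, pvHasDD]
      constructor
      · rintro (hp | hi)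
        · rcases List.cons_prefix_cons.mp hp with ⟨h1, hp2⟩
          rcases List.cons_prefix_cons.mp hp2 with ⟨h2, _⟩
          simp [← h1, ← h2]
        · simp [ih.mp hi]
      · intro h
        simp only [Bool.or_eq_true, decide_eq_true_eq, Bool.and_eq_true] at h
        rcases h with ⟨h1, h2⟩ | h
        · left; rw [h1, h2]
          exact List.cons_prefix_cons.mpr ⟨rfl, List.cons_prefix_cons.mpr ⟨rfl, by simp⟩⟩
        · right; exact ih.mpr h

theorem pvRep2_length_le (s : List Char) : (pvRep2 s).length ≤ s.length := by
  induction s using pvRep2.induct with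
  | case1 => simp [pvRep2]
  | case2 c => simp [pvRep2]
  | case3 a b r hab ih => simp [pvRep2, hab]; omega
  | case4 a b r hab ih => simp [pvRep2, hab] at ih ⊢; omega

theorem pvRep2_length_lt (s : List Char) (h : pvHasDD s = true) :
    (pvRep2 s).length < s.length := by
  induction s using pvRep2.induct with
  | case1 => simp [pvHasDD] at h
  | case2 c => simp [pvHasDD] at h
  | case3 a b r hab ih =>
    have := pvRep2_length_le r
    simp [pvRep2, hab]; omega
  | case4 a b r hab ih =>
    rw [pvHasDD] at h
    have hr : pvHasDD (b :: r) = true := by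
      rcases Bool.or_eq_true_iff.mp h with h1 | h1
      · exfalso; exact hab (by simpa using h1)
      · exact h1
    have := ih hr
    simp [pvRep2, hab] at this ⊢; omega

-- ===== PORT A =====
-- port of the collapse while-loop of A
def pvCollapseA (s : List Char) : List Char :=
  if PySem.Chars.isIn ['_','_'] s then pvCollapseA (PySem.Chars.replace s ['_','_'] ['_']) else s
termination_by s.length
decreasing_by
  rw [pvReplace2_eq]
  exact pvRep2_length_lt s ((pvInfix_iff_hasDD s).mp ((PySem.Chars.isIn_iff_infix _ _).mp (by assumption)))

-- the normalization block A repeats verbatim in its three return paths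
def pvNormA (s : List Char) : List Char :=
  let s := PySem.Chars.replace s [' '] ['_']
  let s := PySem.Chars.replace s ['-'] ['_']
  let s := PySem.Chars.replace s ['.'] ['_']
  let s := PySem.Chars.replace s ['('] []
  let s := PySem.Chars.replace s [')'] []
  PySem.Chars.stripChars (pvCollapseA s) ['_']

def normalize_mesh_id (name : String) (is_bilateral : Bool) : String :=
  let clean := PySem.Chars.lower name.toList
  if is_bilateral then
    -- for suffix in [".l", ".r"]: strip and break
    let clean2 :=
      if PySem.Chars.endswith clean ['.', 'l'] then PySem.Chars.slice clean none (some (-2))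
      else if PySem.Chars.endswith clean ['.', 'r'] then PySem.Chars.slice clean none (some (-2))
      else clean
    String.mk (pvNormA clean2)
  else
    -- for suffix, normalized in [(".l","_l"), (".r","_r")]: strip, remember, early return
    if PySem.Chars.endswith clean ['.', 'l'] then
      String.mk (pvNormA (PySem.Chars.slice clean none (some (-2))) ++ ['_', 'l'])
    else if PySem.Chars.endswith clean ['.', 'r'] then
      String.mk (pvNormA (PySem.Chars.slice clean none (some (-2))) ++ ['_', 'r'])
    else
      String.mk (pvNormA clean)

-- ===== PORT B =====
-- body of B's single for-loop over the characters
def pvStepB (out : List Char) (ch : Char) : List Char :=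
  if ch = '(' ∨ ch = ')' then out
  else
    let ch := if ch = ' ' ∨ ch = '-' ∨ ch = '.' then '_' else ch
    if ch = '_' then
      if out ≠ [] ∧ out.getLast? ≠ some '_' then out ++ ['_'] else out
    else out ++ [ch]

def normalize_mesh_id_alt (name : String) (is_bilateral : Bool) : String :=
  let clean := PySem.Chars.lower name.toList
  let p :=
    if PySem.Chars.endswith clean ['.', 'l'] then
      (PySem.Chars.slice clean none (some (-2)),
       if is_bilateral then ([] : List Char) else ['_', 'l'])
    else if PySem.Chars.endswith clean ['.', 'r'] then
      (PySem.Chars.slice clean none (some (-2)),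
       if is_bilateral then ([] : List Char) else ['_', 'r'])
    else (clean, [])
  let out := p.1.foldl pvStepB []
  let out := if out.getLast? = some '_' then out.dropLast else out
  String.mk (out ++ p.2)

-- ===== PRECONDITION & SPEC =====
def Spec_normalize_mesh_id (name : String) (is_bilateral : Bool) (out : String) : Prop := out = normalize_mesh_id_alt name is_bilateral
instance (name : String) (is_bilateral : Bool) (out : String) : Decidable (Spec_normalize_mesh_id name is_bilateral out) := by unfold Spec_normalize_mesh_id; infer_instance

-- ===== CLAIM (what is proved, stated in full; the proofs are below) =====
def Claim_equal_normalize_mesh_id : Prop := ∀ (name : String) (is_bilateral : Bool), Dom_normalize_mesh_id name is_bilateral → Spec_normalize_mesh_id name is_bilateral (normalize_mesh_id name is_bilateral)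

-- ===== LEMMAS AND PROOFS =====

-- single-char replace is a map / a filter
theorem pvGo1_eq (c : Char) (new : List Char) (fuel : Nat) (l acc : List Char) (h : l.length ≤ fuel) :
    PySem.Chars.replace.go [c] new fuel l acc
      = acc.reverse ++ l.flatMap (fun x => if x = c then new else [x]) := by
  induction fuel generalizing l acc with
  | zero =>
    cases l with
    | nil => simp [PySem.Chars.replace.go]
    | cons a t => simp at h
  | succ n ih =>
    cases l with
    | nil => simp [PySem.Chars.replace.go]
    | cons a t =>
      rw [PySem.Chars.replace.go]
      by_cases hac : a = c
      · have hp : List.isPrefixOf [c] (a :: t) = true := by simp [List.isPrefixOf, hac]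
        simp only [hp, if_pos]
        rw [show ([c] : List Char).length = 1 from rfl, show List.drop 1 (a :: t) = t from rfl]
        rw [ih t _ (by simp at h ⊢; omega)]
        simp [hac]
      · have hp : ¬ (List.isPrefixOf [c] (a :: t) = true) := by
          simp [List.isPrefixOf]; exact fun hca => hac hca.symm
        simp only [hp, ite_false]
        rw [ih t (a :: acc) (by simp at h ⊢; omega)]
        simp [hac]

theorem pvReplace_single_map (s : List Char) (c d : Char) :
    PySem.Chars.replace s [c] [d] = s.map (fun x => if x = c then d else x) := by
  rw [PySem.Chars.replace]
  simp [pvGo1_eq c [d] s.length s [] le_rfl, List.flatMap]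
  induction s with
  | nil => simp
  | cons a t ih => by_cases h : a = c <;> simp [h, ih]

theorem pvReplace_single_del (s : List Char) (c : Char) :
    PySem.Chars.replace s [c] [] = s.filter (fun x => !(x = c)) := by
  rw [PySem.Chars.replace]
  simp [pvGo1_eq c [] s.length s [] le_rfl, List.flatMap]
  induction s with
  | nil => simp
  | cons a t ih => by_cases h : a = c <;> simp [h, ih]

-- canonical collapse of underscore runs, and its theory
def pvDed : List Char → List Char
  | [] => []
  | [c] => [c]
  | a :: b :: r => if a = '_' ∧ b = '_' then pvDed (b :: r) else a :: pvDed (b :: r)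

theorem pvDed_cons (a : Char) (x : List Char) :
    pvDed (a :: x) = if a = '_' ∧ x.head? = some '_' then pvDed x else a :: pvDed x := by
  cases x with
  | nil => simp [pvDed]
  | cons b r =>
    rw [pvDed]
    by_cases hab : a = '_' ∧ b = '_'
    · rw [if_pos hab, if_pos (by simp [hab.1, hab.2])]
    · rw [if_neg hab, if_neg (by simpa using hab)]

theorem pvHead?_rep2 (s : List Char) : (pvRep2 s).head? = s.head? := by
  induction s using pvRep2.induct with
  | case1 => simp [pvRep2]
  | case2 c => simp [pvRep2]
  | case3 a b r hab ih => rw [pvRep2, if_pos hab]; simp [hab.1]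
  | case4 a b r hab ih => rw [pvRep2, if_neg hab]; simp

theorem pvHead?_ded (s : List Char) : (pvDed s).head? = s.head? := by
  induction s using pvDed.induct with
  | case1 => simp [pvDed]
  | case2 c => simp [pvDed]
  | case3 a b r hab ih => rw [pvDed, if_pos hab, ih]; simp [hab.1, hab.2]
  | case4 a b r hab ih => rw [pvDed, if_neg hab]; simp

theorem pvDed_rep2 (s : List Char) : pvDed (pvRep2 s) = pvDed s := by
  induction s using pvRep2.induct with
  | case1 => simp [pvRep2]
  | case2 c => simp [pvRep2]
  | case3 a b r hab ih =>
    obtain ⟨ha, hb⟩ := hab; subst ha; subst hb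
    rw [show pvDed ('_' :: '_' :: r) = pvDed ('_' :: r) from by rw [pvDed, if_pos ⟨rfl, rfl⟩],
      pvRep2, if_pos ⟨rfl, rfl⟩, pvDed_cons, pvDed_cons, pvHead?_rep2, ih]
  | case4 a b r hab ih =>
    rw [pvRep2, if_neg hab, pvDed_cons, pvHead?_rep2, ih,
      if_neg (by simpa using hab), pvDed, if_neg hab]

theorem pvDed_of_not_hasDD (s : List Char) (h : pvHasDD s = false) : pvDed s = s := by
  induction s using pvDed.induct with
  | case1 => simp [pvDed]
  | case2 c => simp [pvDed]
  | case3 a b r hab ih => simp [pvHasDD, hab.1, hab.2] at h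
  | case4 a b r hab ih =>
    rw [pvHasDD, Bool.or_eq_false_iff] at h
    simp [pvDed, hab, ih h.2]

theorem pvCollapseA_eq_ded (s : List Char) : pvCollapseA s = pvDed s := by
  induction s using pvCollapseA.induct with
  | case1 s h ih => rw [pvCollapseA, if_pos h, ih, pvReplace2_eq, pvDed_rep2]
  | case2 s h =>
    rw [pvCollapseA, if_neg h]
    refine (pvDed_of_not_hasDD s ?_).symm
    have hb : PySem.Chars.isIn ['_','_'] s = false := Bool.eq_false_iff.mpr h
    have hni := (PySem.Chars.isIn_eq_false_iff _ _).mp hb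
    cases ht : pvHasDD s with
    | false => rfl
    | true => exact absurd ((pvInfix_iff_hasDD s).mpr ht) hni

theorem pvDed_ne_nil (s : List Char) (h : s ≠ []) : pvDed s ≠ [] := by
  induction s using pvDed.induct with
  | case1 => simp at h
  | case2 c => simp [pvDed]
  | case3 a b r hab ih => rw [pvDed, if_pos hab]; exact ih (by simp)
  | case4 a b r hab ih => rw [pvDed, if_neg hab]; simp

theorem pvHasDD_cons (a : Char) (x : List Char) :
    pvHasDD (a :: x) = ((a = '_' && decide (x.head? = some '_')) || pvHasDD x) := by
  cases x with
  | nil => simp [pvHasDD]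
  | cons b r => rw [pvHasDD]; simp

theorem pvHasDD_ded (s : List Char) : pvHasDD (pvDed s) = false := by
  induction s using pvDed.induct with
  | case1 => simp [pvDed, pvHasDD]
  | case2 c => simp [pvDed, pvHasDD]
  | case3 a b r hab ih => rw [pvDed, if_pos hab]; exact ih
  | case4 a b r hab ih =>
    rw [pvDed, if_neg hab, pvHasDD_cons, pvHead?_ded, ih]
    simp
    tauto

theorem pvGetLast?_cons (a : Char) (l : List Char) (h : l ≠ []) :
    (a :: l).getLast? = l.getLast? := by
  cases l with
  | nil => simp at h
  | cons b t => exact List.getLast?_cons_cons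

theorem pvSuffix_append_right {l m t : List Char} (h : l <:+ m) : l ++ t <:+ m ++ t := by
  obtain ⟨w, hw⟩ := h
  exact ⟨w, by rw [← List.append_assoc, hw]⟩

-- snoc characterization of pvDed
theorem pvDed_snoc (p : List Char) (c : Char) :
    pvDed (p ++ [c])
      = if c = '_' ∧ (pvDed p).getLast? = some '_' then pvDed p else pvDed p ++ [c] := by
  induction p using pvDed.induct with
  | case1 => simp [pvDed]
  | case2 d =>
    by_cases h : d = '_' ∧ c = '_'
    · simp [pvDed, h.1, h.2]
    · have h' : ¬ (c = '_' ∧ (pvDed [d]).getLast? = some '_') := by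
        simp [pvDed]; tauto
      rw [if_neg h']
      simp [pvDed, h]
  | case3 a b r hab ih =>
    rw [show (a :: b :: r) ++ [c] = a :: ((b :: r) ++ [c]) from rfl]
    have hcond : (a = '_' ∧ ((b :: r) ++ [c]).head? = some '_') := by
      simp [hab.1, hab.2]
    rw [pvDed_cons, if_pos hcond, ih, pvDed, if_pos hab]
  | case4 a b r hab ih =>
    have hne : pvDed (b :: r) ≠ [] := pvDed_ne_nil _ (by simp)
    have hA : pvDed (a :: b :: r) = a :: pvDed (b :: r) := by rw [pvDed, if_neg hab]
    have hcond : ¬ (a = '_' ∧ ((b :: r) ++ [c]).head? = some '_') := by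
      simpa using hab
    rw [show (a :: b :: r) ++ [c] = a :: ((b :: r) ++ [c]) from rfl,
      pvDed_cons, if_neg hcond, ih, hA,
      pvGetLast?_cons a (pvDed (b :: r)) hne]
    by_cases h : c = '_' ∧ (pvDed (b :: r)).getLast? = some '_'
    · rw [if_pos h, if_pos h]
    · rw [if_neg h, if_neg h]
      simp

-- the B-side scan computes dropWhile-'_' of pvDed of the mapped/filtered characters
def pvKeep (c : Char) : Bool := !(c = '(' ∨ c = ')')
def pvSub (c : Char) : Char := if c = ' ' ∨ c = '-' ∨ c = '.' then '_' else c
def pvDW (x : List Char) : List Char := x.dropWhile (· == '_')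

theorem pvDW_getLast? (x : List Char) (h : pvDW x ≠ []) : (pvDW x).getLast? = x.getLast? := by
  conv_rhs => rw [← List.takeWhile_append_dropWhile (p := (· == '_')) (l := x)]
  exact (List.getLast?_append_of_ne_nil _ h).symm

theorem pvStep_core (d : List Char) (x : Char) (hx : ¬ (x = '(' ∨ x = ')')) :
    pvStepB (pvDW d) x
      = pvDW (if pvSub x = '_' ∧ d.getLast? = some '_' then d else d ++ [pvSub x]) := by
  have e : pvStepB (pvDW d) x
      = (if pvSub x = '_'
          then (if pvDW d ≠ [] ∧ (pvDW d).getLast? ≠ some '_' then pvDW d ++ ['_'] else pvDW d)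
          else pvDW d ++ [pvSub x]) := by
    rw [pvStepB, if_neg hx]; rfl
  rw [e]
  by_cases hu : pvSub x = '_'
  · rw [if_pos hu]
    by_cases hl : d.getLast? = some '_'
    · have h1 : ¬ (pvDW d ≠ [] ∧ (pvDW d).getLast? ≠ some '_') := by
        intro hc
        exact hc.2 (by rw [pvDW_getLast? d hc.1]; exact hl)
      have h2 : pvSub x = '_' ∧ d.getLast? = some '_' := ⟨hu, hl⟩
      rw [if_neg h1, if_pos h2]
    · have h2 : ¬ (pvSub x = '_' ∧ d.getLast? = some '_') := fun hc => hl hc.2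
      rw [if_neg h2]
      by_cases hn : pvDW d = []
      · -- d is all underscores yet does not end in '_': d must be []
        have hall : ∀ a ∈ d, (a == '_') = true := List.dropWhile_eq_nil_iff.mp hn
        have hd : d = [] := by
          cases hdl : d.getLast? with
          | none => exact List.getLast?_eq_none_iff.mp hdl
          | some a =>
            have ha := hall a (List.mem_of_getLast? hdl)
            simp at ha
            exact absurd (ha ▸ hdl) hl
        have h1 : ¬ (pvDW d ≠ [] ∧ (pvDW d).getLast? ≠ some '_') := fun hc => hc.1 hn
        rw [if_neg h1, hd]
        simp [pvDW, hu]
      · have h1 : pvDW d ≠ [] ∧ (pvDW d).getLast? ≠ some '_' :=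
          ⟨hn, by rw [pvDW_getLast? d hn]; exact hl⟩
        have hE : (d.dropWhile (· == '_')).isEmpty = false := List.isEmpty_eq_false_iff.mpr hn
        rw [if_pos h1, pvDW, pvDW, List.dropWhile_append, if_neg (by simp [hE]), hu]
  · have h2 : ¬ (pvSub x = '_' ∧ d.getLast? = some '_') := fun hc => hu hc.1
    rw [if_neg hu, if_neg h2, pvDW, pvDW, List.dropWhile_append]
    by_cases hn : d.dropWhile (· == '_') = []
    · rw [if_pos (by simp [hn]), hn]
      simp [hu]
    · have hE : (d.dropWhile (· == '_')).isEmpty = false := List.isEmpty_eq_false_iff.mpr hn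
      rw [if_neg (by simp [hE])]

theorem pvFoldB_inv (p : List Char) :
    p.foldl pvStepB [] = pvDW (pvDed ((p.filter pvKeep).map pvSub)) := by
  induction p using List.reverseRecOn with
  | nil => simp [pvDW, pvDed]
  | append_singleton p c ih =>
    rw [List.foldl_append, List.foldl_cons, List.foldl_nil, ih]
    by_cases hk : c = '(' ∨ c = ')'
    · rw [pvStepB, if_pos hk]
      rw [show (p ++ [c]).filter pvKeep = p.filter pvKeep from by
        rw [List.filter_append]; simp [pvKeep, hk]]
    · rw [pvStep_core _ c hk]
      rw [show (p ++ [c]).filter pvKeep = p.filter pvKeep ++ [c] from by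
        rw [List.filter_append]; simp [pvKeep, hk]]
      rw [List.map_append, List.map_cons, List.map_nil, pvDed_snoc]

-- stripping underscores from a double-underscore-free list drops at most one at each end
theorem pvNoDD_dropLast (o : List Char) (h : pvHasDD o = false)
    (h1 : o.getLast? = some '_') : ¬ (o.dropLast.getLast? = some '_') := by
  intro h2
  have e1 : o = o.dropLast ++ ['_'] := (List.dropLast_append_getLast? _ h1).symm
  have e2 : o.dropLast = o.dropLast.dropLast ++ ['_'] :=
    (List.dropLast_append_getLast? _ h2).symm
  have hsuf : (['_','_'] : List Char) <:+: o := by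
    rw [e1]; conv_lhs => rw [show (['_','_'] : List Char) = ['_'] ++ ['_'] from rfl]
    exact (pvSuffix_append_right (t := ['_']) (e2 ▸ (List.suffix_append _ ['_']))).isInfix
  rw [(pvInfix_iff_hasDD o).mp hsuf] at h
  exact absurd h (by simp)

theorem pvHasDD_suffix (s t : List Char) (h : t <:+ s) (hs : pvHasDD s = false) :
    pvHasDD t = false := by
  cases ht : pvHasDD t with
  | false => rfl
  | true =>
    have : (['_','_'] : List Char) <:+: s := ((pvInfix_iff_hasDD t).mpr ht).trans h.isInfix
    rw [(pvInfix_iff_hasDD s).mp this] at hs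
    exact absurd hs (by simp)

theorem pvStrip_ded (d : List Char) (hdd : pvHasDD d = false) :
    PySem.Chars.stripChars d ['_']
      = (if (pvDW d).getLast? = some '_' then (pvDW d).dropLast else pvDW d) := by
  rw [PySem.Chars.stripChars]
  have hpred : (fun c => (['_'] : List Char).contains c) = (fun c => c == '_') := by
    funext c; rw [List.contains_cons]; simp
  rw [hpred]
  show ((pvDW d).reverse.dropWhile (· == '_')).reverse = _
  have ho : pvHasDD (pvDW d) = false := pvHasDD_suffix d _ (List.dropWhile_suffix _) hdd
  cases hl : (pvDW d).getLast? with
  | none =>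
    have : pvDW d = [] := List.getLast?_eq_none_iff.mp hl
    simp [this]
  | some a =>
    have e1 : pvDW d = (pvDW d).dropLast ++ [a] := (List.dropLast_append_getLast? _ hl).symm
    have h2 : (pvDW d).reverse = a :: (pvDW d).dropLast.reverse := by
      conv_lhs => rw [e1]
      simp
    by_cases ha : a = '_'
    · subst ha
      rw [if_pos rfl, h2,
        show List.dropWhile (· == '_') ('_' :: (pvDW d).dropLast.reverse)
            = List.dropWhile (· == '_') ((pvDW d).dropLast.reverse) from by
          rw [List.dropWhile_cons]; simp]
      have hdl : ¬ ((pvDW d).dropLast.getLast? = some '_') := pvNoDD_dropLast _ ho hl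
      have hstop : (pvDW d).dropLast.reverse.dropWhile (· == '_')
          = (pvDW d).dropLast.reverse := by
        cases hrev : (pvDW d).dropLast.reverse with
        | nil => simp
        | cons y ys =>
          have hyl : (pvDW d).dropLast.getLast? = some y := by
            rw [← List.head?_reverse, hrev]; rfl
          have hy : ¬ ((y == '_') = true) := by
            simp only [beq_iff_eq]
            intro hc; exact hdl (hc ▸ hyl)
          rw [List.dropWhile_cons]
          simp [hy]
      rw [hstop, List.reverse_reverse]
    · rw [if_neg (by simp [ha]), h2,
        show List.dropWhile (· == '_') (a :: (pvDW d).dropLast.reverse)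
            = a :: (pvDW d).dropLast.reverse from by
          rw [List.dropWhile_cons]; simp [ha],
        ← h2, List.reverse_reverse]

-- A's replace chain is B's filter-and-map
theorem pvChain_eq (s : List Char) :
    PySem.Chars.replace (PySem.Chars.replace (PySem.Chars.replace
      (PySem.Chars.replace (PySem.Chars.replace s [' '] ['_'])
        ['-'] ['_']) ['.'] ['_']) ['('] []) [')'] []
      = (s.filter pvKeep).map pvSub := by
  rw [pvReplace_single_map, pvReplace_single_map, pvReplace_single_map,
    pvReplace_single_del, pvReplace_single_del]
  induction s with
  | nil => simp
  | cons a t ih =>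
    by_cases h1 : a = ' ' <;> by_cases h2 : a = '-' <;> by_cases h3 : a = '.' <;>
      by_cases h4 : a = '(' <;> by_cases h5 : a = ')' <;>
      simp [h1, h2, h3, h4, h5, pvSub, pvKeep] <;>
      simp_all

-- the core: A's normalization block equals B's scan (plus the final one-char strip)
theorem pvCore (s : List Char) :
    pvNormA s
      = (if (s.foldl pvStepB []).getLast? = some '_'
          then (s.foldl pvStepB []).dropLast else s.foldl pvStepB []) := by
  simp only [pvNormA]
  rw [pvChain_eq, pvCollapseA_eq_ded, pvStrip_ded _ (pvHasDD_ded _), pvFoldB_inv]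

-- ===== VERDICT (by name: the statement is the Claim_ definition above) =====
theorem normalize_mesh_id_spec : Claim_equal_normalize_mesh_id := by
  intro name is_bilateral _
  unfold Spec_normalize_mesh_id normalize_mesh_id normalize_mesh_id_alt
  by_cases hl : PySem.Chars.endswith (PySem.Chars.lower name.toList) ['.', 'l'] = true
  · cases is_bilateral <;> simp [hl, pvCore]
  · by_cases hr : PySem.Chars.endswith (PySem.Chars.lower name.toList) ['.', 'r'] = true
    · cases is_bilateral <;> simp [hl, hr, pvCore]
    · cases is_bilateral <;> simp [hl, hr, pvCore]
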